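-- pv_equiv track=rewrite | github.com/lanaijun347/PythonStudyLib | BYD_Project/basics.py | cmd_to_dict
-- ===== SOURCE A (Python) =====
-- def cmd_to_dict(cmd_list):
--     rm_cmd = []  # 去重后的命令
--     for cmd in cmd_list:
--         if cmd not in rm_cmd:
--             rm_cmd.append(cmd)
--     num_list = [i for i in range(len(rm_cmd))]
--     cmd_dict = dict(zip(num_list, rm_cmd))
--     ans = []
--     for cmd in cmd_list:
--         for key, value in cmd_dict.items():
--             if cmd == value:
--                 ans.append(str(key).rjust(3, '0'))
--     return rm_cmd, ans
-- ===== SOURCE B (Python) =====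
-- def cmd_to_dict(cmd_list):
--     # single pass with a hash index: no dedup pre-pass, no nested dict scan
--     seen = {}
--     ans = []
--     for cmd in cmd_list:
--         if cmd not in seen:
--             seen[cmd] = len(seen)
--         ans.append(str(seen[cmd]).rjust(3, '0'))
--     return list(seen), ans
-- ===== Notes on version B (the rewrite author's own statement) =====
-- stated objective: faster
-- what changed: Replaces A's three passes (list dedup with linear membership scans, dict built from zip, then for every element a full scan over all dict items) by one pass that keeps a value->index hash map: new elements get index len(seen), and each output is looked up in O(1).
import Mathlib
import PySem

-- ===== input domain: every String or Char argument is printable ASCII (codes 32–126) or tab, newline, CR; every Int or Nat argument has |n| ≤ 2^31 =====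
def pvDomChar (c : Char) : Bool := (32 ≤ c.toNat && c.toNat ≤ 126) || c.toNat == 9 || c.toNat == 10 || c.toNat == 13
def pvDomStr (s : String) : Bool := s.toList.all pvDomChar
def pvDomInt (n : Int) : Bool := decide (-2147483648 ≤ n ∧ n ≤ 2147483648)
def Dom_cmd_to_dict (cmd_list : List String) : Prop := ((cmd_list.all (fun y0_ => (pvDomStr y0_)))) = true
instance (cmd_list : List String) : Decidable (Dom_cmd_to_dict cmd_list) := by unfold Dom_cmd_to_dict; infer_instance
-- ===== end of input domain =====

-- B replaces A's three passes (list dedup, dict from zip, nested full dict scan per element)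
-- by one pass over cmd_list keeping a value→index dictionary (objective: faster).

-- ===== PORT A =====
-- hand port of s.rjust(3, '0') (PySem has no rjust): exact — pad on the left with '0' up to width 3
def pvRjust30 (s : String) : String := String.ofList (List.replicate (3 - s.toList.length) '0' ++ s.toList)

-- the body of A's dedup loop: `if cmd not in rm_cmd: rm_cmd.append(cmd)`
def pvDedupStep (rm : List String) (cmd : String) : List String :=
  if ¬ (cmd ∈ rm) then rm ++ [cmd] else rm

def cmd_to_dict (cmd_list : List String) : List String × List String :=
  let rm_cmd := cmd_list.foldl pvDedupStep []
  let num_list := PySem.List.pyRange 0 (rm_cmd.length : Int) 1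
  -- dict(zip(num_list, rm_cmd)): insert the zipped pairs in order
  let cmd_dict : PySem.Dict Int String :=
    (num_list.zip rm_cmd).foldl (fun d p => d.insert p.1 p.2) PySem.Dict.empty
  let ans := cmd_list.foldl (fun ans cmd =>
    cmd_dict.items.foldl (fun ans kv =>
      if cmd == kv.2 then ans ++ [pvRjust30 (PySem.Int.toStr kv.1)] else ans) ans) []
  (rm_cmd, ans)

-- ===== PORT B =====
-- the body of B's single loop; seen[cmd] is always present after the insert, so getD's
-- default 0 is never used
def pvAltStep (st : PySem.Dict String Int × List String) (cmd : String) :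
    PySem.Dict String Int × List String :=
  let seen := if ¬ (st.1.contains cmd) then st.1.insert cmd (st.1.size : Int) else st.1
  (seen, st.2 ++ [pvRjust30 (PySem.Int.toStr (seen.getD cmd 0))])

def cmd_to_dict_alt (cmd_list : List String) : List String × List String :=
  let st := cmd_list.foldl pvAltStep (PySem.Dict.empty, [])
  (st.1.keys, st.2)

-- ===== PRECONDITION & SPEC =====
def Spec_cmd_to_dict (cmd_list : List String) (out : List String × List String) : Prop := out = cmd_to_dict_alt cmd_list
instance (cmd_list : List String) (out : List String × List String) : Decidable (Spec_cmd_to_dict cmd_list out) := by unfold Spec_cmd_to_dict; infer_instance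

-- ===== CLAIM (what is proved, stated in full; the proofs are below) =====
def Claim_equal_cmd_to_dict : Prop := ∀ (cmd_list : List String), Dom_cmd_to_dict cmd_list → Spec_cmd_to_dict cmd_list (cmd_to_dict cmd_list)

-- ===== LEMMAS AND PROOFS =====

-- the common value both programs emit for cmd, relative to a dedup list rm
def pvF (rm : List String) (cmd : String) : String :=
  pvRjust30 (PySem.Int.toStr (rm.idxOf cmd : Int))

-- the dictionary B has built after its dedup list reached rm
def pvMkD (rm : List String) : PySem.Dict String Int :=
  PySem.Dict.mk ((PySem.List.enumerate rm 0).map (fun p => (p.2, p.1)))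

-- dedup-fold facts ------------------------------------------------------------
theorem pvDedup_prefix (l : List String) (rm : List String) :
    ∃ t, l.foldl pvDedupStep rm = rm ++ t := by
  induction l generalizing rm with
  | nil => exact ⟨[], by simp⟩
  | cons c t ih =>
    simp only [List.foldl_cons]
    obtain ⟨u, hu⟩ := ih (pvDedupStep rm c)
    by_cases h : c ∈ rm
    · refine ⟨u, ?_⟩; rw [hu]; simp [pvDedupStep, h]
    · refine ⟨c :: u, ?_⟩; rw [hu]; simp [pvDedupStep, h]

theorem pvDedup_nodup (l : List String) (rm : List String) (h : rm.Nodup) :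
    (l.foldl pvDedupStep rm).Nodup := by
  induction l generalizing rm with
  | nil => simpa
  | cons c t ih =>
    simp only [List.foldl_cons]
    apply ih
    unfold pvDedupStep
    by_cases hc : c ∈ rm <;> simp [hc, h, List.nodup_append]
    exact fun a ha e => hc (e ▸ ha)

theorem pvDedup_mem (l : List String) (rm : List String) (c : String) (h : c ∈ l ∨ c ∈ rm) :
    c ∈ l.foldl pvDedupStep rm := by
  induction l generalizing rm with
  | nil => simpa using h
  | cons x t ih =>
    simp only [List.foldl_cons]
    apply ih
    rcases h with h | h
    · rcases List.mem_cons.mp h with rfl | h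
      · unfold pvDedupStep; by_cases hc : c ∈ rm <;> simp [hc]
      · exact Or.inl h
    · right; unfold pvDedupStep; by_cases hc : x ∈ rm <;> simp [hc, h]

theorem pvIdxOf_dedup (l : List String) (rm : List String) (c : String) (h : c ∈ rm) :
    (l.foldl pvDedupStep rm).idxOf c = rm.idxOf c := by
  obtain ⟨t, ht⟩ := pvDedup_prefix l rm
  rw [ht, List.idxOf_append_of_mem h]

-- A-side ----------------------------------------------------------------------
theorem pvInner_none (cmd : String) (pairs : List (Int × String)) (ans : List String)
    (h : ∀ kv ∈ pairs, cmd ≠ kv.2) :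
    pairs.foldl (fun ans kv =>
      if cmd == kv.2 then ans ++ [pvRjust30 (PySem.Int.toStr kv.1)] else ans) ans = ans := by
  induction pairs generalizing ans with
  | nil => rfl
  | cons kv rest ih =>
    simp only [List.foldl_cons]
    have : ¬ (cmd == kv.2) = true := by
      simp only [beq_iff_eq]; exact h kv (by simp)
    rw [if_neg this]
    exact ih ans (fun p hp => h p (by simp [hp]))

theorem pvZip_enum {α : Type} (xs : List α) (s : Nat) :
    ((List.range' s xs.length).map (fun k => (Nat.cast k : Int))).zip xs = PySem.List.enumerate xs s := by
  induction xs generalizing s with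
  | nil => rfl
  | cons x t ih =>
    rw [List.length_cons, List.range'_succ, List.map_cons, List.zip_cons_cons, ih (s + 1),
      PySem.List.enumerate_cons]
    norm_num

theorem pvInner_scan (rm : List String) (j : Int) (ans : List String) (cmd : String)
    (hnd : rm.Nodup) (hmem : cmd ∈ rm) :
    ((PySem.List.enumerate rm j).foldl (fun ans kv =>
      if cmd == kv.2 then ans ++ [pvRjust30 (PySem.Int.toStr kv.1)] else ans) ans)
    = ans ++ [pvRjust30 (PySem.Int.toStr (j + (rm.idxOf cmd : Int)))] := by
  induction rm generalizing j ans with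
  | nil => simp at hmem
  | cons c rest ih =>
    rw [PySem.List.enumerate_cons, List.foldl_cons]
    by_cases hc : cmd = c
    · subst hc
      rw [if_pos (by simp)]
      have hnotin : cmd ∉ rest := (List.nodup_cons.mp hnd).1
      rw [pvInner_none cmd _ _ ?_]
      · simp [List.idxOf_cons_self]
      · intro kv hkv heq
        apply hnotin
        obtain ⟨k, hk, hp⟩ := (PySem.List.mem_enumerate_iff rest (j + 1) kv).mp hkv
        have : kv.2 = rest[k] := by rw [hp]
        rw [heq, this]
        exact List.getElem_mem hk
    · rw [if_neg (by simp [hc])]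
      have hmem' : cmd ∈ rest := by
        rcases List.mem_cons.mp hmem with h | h
        · exact absurd h hc
        · exact h
      rw [ih (j + 1) ans ((List.nodup_cons.mp hnd).2) hmem']
      have : (List.idxOf cmd (c :: rest) : Int) = (rest.idxOf cmd : Int) + 1 := by
        rw [List.idxOf_cons_ne _ (by simpa using fun h => hc h.symm)]
        push_cast; ring
      rw [this]
      ring_nf

theorem pvOuter (l : List String) (R : List String) (ans : List String)
    (pairs : List (Int × String))
    (h : ∀ c ∈ l, pairs.foldl (fun ans kv =>
      if c == kv.2 then ans ++ [pvRjust30 (PySem.Int.toStr kv.1)] else ans) = (· ++ [pvF R c])) :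
    l.foldl (fun ans cmd => pairs.foldl (fun ans kv =>
      if cmd == kv.2 then ans ++ [pvRjust30 (PySem.Int.toStr kv.1)] else ans) ans) ans
    = ans ++ l.map (pvF R) := by
  induction l generalizing ans with
  | nil => simp
  | cons c t ih =>
    simp only [List.foldl_cons, List.map_cons]
    rw [congrFun (h c (by simp)) ans, ih _ (fun c hc => h c (by simp [hc]))]
    simp

-- B-side ----------------------------------------------------------------------
theorem pvMkD_keys (rm : List String) : (pvMkD rm).keys = rm := by
  simp [pvMkD, PySem.Dict.keys_mk, List.map_map]
  exact PySem.List.map_snd_enumerate rm 0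

theorem pvMkD_contains (rm : List String) (c : String) :
    (pvMkD rm).contains c = decide (c ∈ rm) := by
  rw [PySem.Dict.contains_eq_decide_mem_keys, pvMkD_keys]

theorem pvMkD_insert (rm : List String) (c : String) (h : c ∉ rm) :
    (pvMkD rm).insert c (rm.length : Int) = pvMkD (rm ++ [c]) := by
  apply PySem.Dict.ext
  rw [PySem.Dict.items_insert_of_not_contains _ _ (by simp [pvMkD_contains, h])]
  simp [pvMkD, PySem.List.enumerate_append, PySem.List.enumerate_cons, PySem.List.enumerate_nil]

theorem pvMkD_size (rm : List String) : (pvMkD rm).size = rm.length := by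
  simp [pvMkD, PySem.Dict.size, PySem.List.length_enumerate]

theorem pvMkD_getD (rm : List String) (c : String) (hnd : rm.Nodup) (hmem : c ∈ rm) :
    (pvMkD rm).getD c 0 = (rm.idxOf c : Int) := by
  apply PySem.Dict.getD_of_mem_items
  · have hk : rm.idxOf c < rm.length := List.idxOf_lt_length_of_mem hmem
    have : ((0 + (rm.idxOf c : Int)), rm[rm.idxOf c]) ∈ PySem.List.enumerate rm 0 :=
      (PySem.List.mem_enumerate_iff rm 0 _).mpr ⟨rm.idxOf c, hk, rfl⟩
    have hx : rm[rm.idxOf c] = c := List.getElem_idxOf hk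
    simpa [pvMkD, hx] using List.mem_map_of_mem (f := fun p => (p.2, p.1)) this
  · rw [pvMkD_keys]; exact hnd

theorem pvIdxOf_snoc (rm : List String) (c : String) (hc : c ∉ rm) :
    List.idxOf c (rm ++ [c]) = rm.length := by
  induction rm with
  | nil => simp [List.idxOf_cons_self]
  | cons x t ih =>
    have hx : c ≠ x := fun e => hc (by simp [e])
    simp only [List.cons_append, List.idxOf_cons_ne _ (by simpa using fun h => hx h.symm),
      List.length_cons]
    rw [ih (fun h => hc (by simp [h]))]

theorem pvAlt_fold (l : List String) (rm : List String) (ans : List String) (hnd : rm.Nodup) :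
    l.foldl pvAltStep (pvMkD rm, ans)
    = (pvMkD (l.foldl pvDedupStep rm), ans ++ l.map (pvF (l.foldl pvDedupStep rm))) := by
  induction l generalizing rm ans with
  | nil => simp
  | cons c t ih =>
    simp only [List.foldl_cons]
    have hstep : pvAltStep (pvMkD rm, ans) c
        = (pvMkD (pvDedupStep rm c), ans ++ [pvF (pvDedupStep rm c) c]) := by
      by_cases hc : c ∈ rm
      · dsimp only [pvAltStep, pvDedupStep, pvF]
        rw [if_neg (by simp [pvMkD_contains, hc]), if_neg (by simp [hc]),
          pvMkD_getD rm c hnd hc]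
      · dsimp only [pvAltStep, pvDedupStep, pvF]
        rw [pvMkD_contains, pvMkD_size, if_pos (by simp [hc]), if_pos hc,
          pvMkD_insert rm c hc,
          pvMkD_getD (rm ++ [c]) c
            (by simp [List.nodup_append, hnd]; exact fun a ha e => hc (e ▸ ha))
            (by simp),
          pvIdxOf_snoc rm c hc]
    rw [hstep]
    have hnd1 : (pvDedupStep rm c).Nodup := by
      unfold pvDedupStep
      by_cases hc : c ∈ rm
      · simpa [hc] using hnd
      · simp only [hc, not_false_eq_true, if_pos]
        simp [List.nodup_append, hnd]
        exact fun a ha e => hc (e ▸ ha)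
    rw [ih (pvDedupStep rm c) _ hnd1]
    have hc1 : c ∈ pvDedupStep rm c := by
      unfold pvDedupStep; by_cases hc : c ∈ rm <;> simp [hc]
    have : pvF (pvDedupStep rm c) c = pvF (t.foldl pvDedupStep (pvDedupStep rm c)) c := by
      unfold pvF; rw [pvIdxOf_dedup t _ c hc1]
    simp [this]

-- assembling the two sides ----------------------------------------------------
theorem pvA_eq (cmd_list : List String) :
    cmd_to_dict cmd_list
    = (cmd_list.foldl pvDedupStep [],
       cmd_list.map (pvF (cmd_list.foldl pvDedupStep []))) := by
  have hnd : (cmd_list.foldl pvDedupStep []).Nodup := pvDedup_nodup cmd_list [] (by simp)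
  set R := cmd_list.foldl pvDedupStep [] with hR
  show (R, cmd_list.foldl (fun ans cmd =>
      ((((PySem.List.pyRange 0 (R.length : Int) 1).zip R).foldl
          (fun d p => d.insert p.1 p.2) PySem.Dict.empty).items).foldl
        (fun ans kv => if cmd == kv.2 then ans ++ [pvRjust30 (PySem.Int.toStr kv.1)] else ans)
        ans) [])
    = (R, cmd_list.map (pvF R))
  have hnum : PySem.List.pyRange 0 (R.length : Int) 1
      = (List.range' 0 R.length).map (fun k => (Nat.cast k : Int)) := by
    rw [← List.range_eq_range']
    exact PySem.List.pyRange_zero_natCast R.length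
  have hitems : ((((PySem.List.pyRange 0 (R.length : Int) 1).zip R).foldl
      (fun d p => d.insert p.1 p.2) (PySem.Dict.empty : PySem.Dict Int String)).items)
      = PySem.List.enumerate R 0 := by
    rw [hnum]
    have hfresh := PySem.Dict.items_foldl_insert_fresh
      (l := (((List.range' 0 R.length).map (fun k => (Nat.cast k : Int))).zip R))
      (k := fun p => p.1) (v := fun p => p.2) (d := (PySem.Dict.empty : PySem.Dict Int String))
      (by intro a _; simp [PySem.Dict.contains_empty])
      (by
        have e : (fun (p : Int × String) => p.1) = Prod.fst := rfl
        rw [e, List.map_fst_zip (by simp)]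
        exact (List.nodup_range' 1).map (fun a b hab => by exact_mod_cast hab))
    rw [hfresh]
    simpa using pvZip_enum R 0
  rw [hitems]
  congr 1
  rw [pvOuter cmd_list R [] (PySem.List.enumerate R 0) ?_]
  · simp
  · intro c hc
    funext ans
    have hcR : c ∈ R := pvDedup_mem cmd_list [] c (Or.inl hc)
    rw [pvInner_scan R 0 ans c hnd hcR]
    unfold pvF
    norm_num

theorem pvB_eq (cmd_list : List String) :
    cmd_to_dict_alt cmd_list
    = (cmd_list.foldl pvDedupStep [],
       cmd_list.map (pvF (cmd_list.foldl pvDedupStep []))) := by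
  unfold cmd_to_dict_alt
  have h0 : (PySem.Dict.empty : PySem.Dict String Int) = pvMkD [] := by
    apply PySem.Dict.ext; simp [pvMkD, PySem.List.enumerate_nil]; rfl
  rw [h0, pvAlt_fold cmd_list [] [] (by simp)]
  simp [pvMkD_keys]

-- ===== VERDICT (by name: the statement is the Claim_ definition above) =====
theorem cmd_to_dict_spec : Claim_equal_cmd_to_dict := by
  intro cmd_list _
  unfold Spec_cmd_to_dict
  rw [pvA_eq, pvB_eq]
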